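-- pv_equiv track=rewrite | github.com/mozaiques/zombase | zombase/cli.py | compute_semver
-- ===== SOURCE A (Python) =====
-- def compute_semver(current_version, release='normal', compute_dev=True):
--     """Compute and return the next version number, given a the current
--     version and the release type ('normal', 'minor' or 'major'), as well
--     as the next dev version (if `compute_dev` is 'True').
--
--     """
--     if current_version.endswith('dev'):
--         dev_version = current_version.replace('dev', '')
--         dev_version_parts = list(map(int, dev_version.split('.')))
--         current_version_parts = dev_version_parts
--         current_version_parts[2] -= 1
--     else:
--         current_version_parts = list(map(int, current_version.split('.')))
--
--     release_version_parts = current_version_parts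
--     if release == 'minor':
--         release_version_parts[2] += 1
--     elif release == 'normal':
--         release_version_parts[1] += 1
--         release_version_parts[2] = 0
--     elif release == 'major':
--         release_version_parts[0] += 1
--         release_version_parts[1] = 0
--         release_version_parts[2] = 0
--
--     release_version = '.'.join(map(str, release_version_parts))
--
--     next_dev_version = None
--     if compute_dev:
--         next_dev_version, _ = compute_semver(
--             release_version, release='minor', compute_dev=False)
--         next_dev_version = '{}dev'.format(next_dev_version)
--
--     return release_version, next_dev_version
-- ===== SOURCE B (Python) =====
-- _BUMP_INDEX = {'major': 0, 'normal': 1, 'minor': 2}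
--
--
-- def _transform(version, k, patch_delta=0):
--     """Canonicalise every dot-part through int(), add patch_delta to part 2,
--     and apply the bump rule for index k (increment part k, zero the parts
--     between k and 2); k is None for an unknown release type."""
--     out = []
--     for i, part in enumerate(version.split('.')):
--         n = int(part) + (patch_delta if i == 2 else 0)
--         if k is not None and i <= 2:
--             if i == k:
--                 n += 1
--             elif k < i:
--                 n = 0
--         out.append(str(n))
--     return '.'.join(out)
--
--
-- def compute_semver(current_version, release='normal', compute_dev=True):
--     if current_version.endswith('dev'):
--         base, delta = current_version.replace('dev', ''), -1
--     else:
--         base, delta = current_version, 0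
--     release_version = _transform(base, _BUMP_INDEX.get(release), delta)
--     if not compute_dev:
--         return release_version, None
--     return release_version, _transform(release_version, 2) + 'dev'
-- ===== Notes on version B (the rewrite author's own statement) =====
-- stated objective: alternative
-- what changed: Replaces A's parse-to-int-list / in-place branch-chain mutation / join / one-level recursion by a single table-driven string transformer: a dict maps the release type to a bump index k and one enumerate pass over the dot-parts applies the arithmetic rule (increment part k, zero parts between k and 2, fold the dev decrement into the same pass) emitting strings directly; the dev version is the same transformer applied with k=2, with no recursion and no list mutation.
import Mathlib
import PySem

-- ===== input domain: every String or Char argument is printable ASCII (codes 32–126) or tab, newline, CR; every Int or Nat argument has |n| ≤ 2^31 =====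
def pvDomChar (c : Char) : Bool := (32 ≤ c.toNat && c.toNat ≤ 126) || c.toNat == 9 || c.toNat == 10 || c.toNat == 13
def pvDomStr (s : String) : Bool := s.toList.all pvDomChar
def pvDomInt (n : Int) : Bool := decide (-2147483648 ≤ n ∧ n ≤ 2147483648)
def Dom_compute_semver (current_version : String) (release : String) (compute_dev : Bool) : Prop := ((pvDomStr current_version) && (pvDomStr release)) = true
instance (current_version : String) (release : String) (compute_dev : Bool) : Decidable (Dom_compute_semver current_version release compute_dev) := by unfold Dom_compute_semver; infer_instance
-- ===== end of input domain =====

-- B replaces A's parse-to-int-list / in-place branch-chain mutation / recursion by a single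
-- table-driven string transformer (dict release→bump index, one enumerate pass applying an
-- arithmetic rule per dot-part, applied once more with index 2 for the dev version) —
-- objective: alternative decomposition, same cost; values agree on every input A accepts.

-- ===== PORT A =====
-- int(p) is ported as PySem.Int.ofStr? and xs[i] access/assignment as pyGetD/pySetD;
-- Pre_compute_semver excludes exactly the ValueError/IndexError inputs, so the
-- .getD defaults below are never reached inside Pre_.
def compute_semver (current_version : String) (release : String) (compute_dev : Bool) :
    String × Option String :=
  let current_version_parts :=
    if PySem.Str.endswith current_version "dev" then
      let dev_version := PySem.Str.replace current_version "dev" ""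
      let dev_version_parts :=
        ((PySem.Str.split? dev_version ".").getD []).map (fun p => (PySem.Int.ofStr? p).getD 0)
      PySem.List.pySetD dev_version_parts 2 (PySem.List.pyGetD dev_version_parts 2 0 - 1)
    else
      ((PySem.Str.split? current_version ".").getD []).map (fun p => (PySem.Int.ofStr? p).getD 0)
  let release_version_parts :=
    if release == "minor" then
      PySem.List.pySetD current_version_parts 2 (PySem.List.pyGetD current_version_parts 2 0 + 1)
    else if release == "normal" then
      let t := PySem.List.pySetD current_version_parts 1
        (PySem.List.pyGetD current_version_parts 1 0 + 1)
      PySem.List.pySetD t 2 0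
    else if release == "major" then
      let t0 := PySem.List.pySetD current_version_parts 0
        (PySem.List.pyGetD current_version_parts 0 0 + 1)
      let t1 := PySem.List.pySetD t0 1 0
      PySem.List.pySetD t1 2 0
    else
      current_version_parts
  let release_version := PySem.Str.join "." (release_version_parts.map PySem.Int.toStr)
  if h : compute_dev then
    let next_dev_version := (compute_semver release_version "minor" false).1 ++ "dev"
    (release_version, some next_dev_version)
  else
    (release_version, none)
termination_by (if compute_dev then 1 else 0)
decreasing_by simp [h]

-- ===== PORT B =====
-- _transform(version, k, patch_delta): one enumerate pass over the dot-parts,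
-- appending str(rule(i, int(part))) to the output list, then '.'-join.
-- _BUMP_INDEX module constant
def altTable : PySem.Dict String Int := ⟨[("major", (0 : Int)), ("normal", 1), ("minor", 2)]⟩

def altTransform (version : String) (k : Option Int) (patch_delta : Int) : String :=
  let out := (PySem.List.enumerate ((PySem.Str.split? version ".").getD []) 0).foldl
    (fun acc ip =>
      let n := (PySem.Int.ofStr? ip.2).getD 0 + (if ip.1 == 2 then patch_delta else 0)
      let n' := match k with
        | none => n
        | some kk => if ip.1 ≤ 2 then (if ip.1 == kk then n + 1 else if kk < ip.1 then 0 else n)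
                     else n
      acc ++ [PySem.Int.toStr n']) []
  PySem.Str.join "." out

def compute_semver_alt (current_version : String) (release : String) (compute_dev : Bool) :
    String × Option String :=
  let bd := if PySem.Str.endswith current_version "dev" then
              (PySem.Str.replace current_version "dev" "", (-1 : Int))
            else (current_version, 0)
  let release_version :=
    altTransform bd.1
      (PySem.Dict.get? altTable release) bd.2
  if !compute_dev then (release_version, none)
  else (release_version, some (altTransform release_version (some 2) 0 ++ "dev"))

-- ===== PRECONDITION & SPEC =====
-- Pre_ = exactly the inputs where Python A returns: every dot-separated part of the
-- (dev-suffix-stripped) version parses as an int (else ValueError), and index 2 is in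
-- range whenever A touches it: in the dev branch, for a named release, for the dev recursion.
def Pre_compute_semver (current_version : String) (release : String) (compute_dev : Bool) : Prop :=
  let s := if PySem.Str.endswith current_version "dev" then
             PySem.Str.replace current_version "dev" "" else current_version
  let ps := (PySem.Str.split? s ".").getD []
  (∀ p ∈ ps, (PySem.Int.ofStr? p).isSome = true) ∧
  (PySem.Str.endswith current_version "dev" = true → 3 ≤ ps.length) ∧
  ((release = "minor" ∨ release = "normal" ∨ release = "major") → 3 ≤ ps.length) ∧
  (compute_dev = true → 3 ≤ ps.length)

instance (current_version : String) (release : String) (compute_dev : Bool) :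
    Decidable (Pre_compute_semver current_version release compute_dev) := by
  unfold Pre_compute_semver; infer_instance

def pvWitness_compute_semver : String × String × Bool := ("1.2.3", "normal", true)

def Spec_compute_semver (current_version : String) (release : String) (compute_dev : Bool) (out : String × Option String) : Prop := out = compute_semver_alt current_version release compute_dev
instance (current_version : String) (release : String) (compute_dev : Bool) (out : String × Option String) : Decidable (Spec_compute_semver current_version release compute_dev out) := by unfold Spec_compute_semver; infer_instance

-- ===== CLAIM (what is proved, stated in full; the proofs are below) =====
def Claim_equal_compute_semver : Prop := ∀ (current_version : String) (release : String) (compute_dev : Bool), Dom_compute_semver current_version release compute_dev → Pre_compute_semver current_version release compute_dev → Spec_compute_semver current_version release compute_dev (compute_semver current_version release compute_dev)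

-- ===== LEMMAS AND PROOFS =====

-- proof-side abbreviations for A's pipeline
def aParts (version : String) : List Int :=
  ((PySem.Str.split? version ".").getD []).map (fun p => (PySem.Int.ofStr? p).getD 0)

def aVP (version : String) : List Int :=
  if PySem.Str.endswith version "dev" then
    PySem.List.pySetD (aParts (PySem.Str.replace version "dev" "")) 2
      (PySem.List.pyGetD (aParts (PySem.Str.replace version "dev" "")) 2 0 - 1)
  else
    aParts version

def aBump (p : List Int) (release : String) : List Int :=
  if release == "minor" then
    PySem.List.pySetD p 2 (PySem.List.pyGetD p 2 0 + 1)
  else if release == "normal" then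
    PySem.List.pySetD (PySem.List.pySetD p 1 (PySem.List.pyGetD p 1 0 + 1)) 2 0
  else if release == "major" then
    PySem.List.pySetD (PySem.List.pySetD (PySem.List.pySetD p 0 (PySem.List.pyGetD p 0 0 + 1)) 1 0) 2 0
  else
    p

def aFmt (p : List Int) : String :=
  PySem.Str.join "." (p.map PySem.Int.toStr)

theorem A_unfold (cv rel : String) (dev : Bool) :
    compute_semver cv rel dev =
      (aFmt (aBump (aVP cv) rel),
       if dev then
         some ((compute_semver (aFmt (aBump (aVP cv) rel)) "minor" false).1 ++ "dev")
       else none) := by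
  rw [compute_semver]
  cases dev <;> rfl

-- proof-side view of B: the per-part rule and the int list altTransform prints
def bRule (k : Option Int) (i n : Int) : Int :=
  match k with
  | none => n
  | some kk => if i ≤ 2 then (if i == kk then n + 1 else if kk < i then 0 else n) else n

def bList (ps : List String) (k : Option Int) (δ : Int) : List Int :=
  (PySem.List.enumerate ps 0).map
    (fun ip => bRule k ip.1 ((PySem.Int.ofStr? ip.2).getD 0 + (if ip.1 == 2 then δ else 0)))

theorem transform_eq (v : String) (k : Option Int) (δ : Int) :
    altTransform v k δ = aFmt (bList ((PySem.Str.split? v ".").getD []) k δ) := by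
  rw [altTransform, aFmt, bList, PySem.List.foldl_append_singleton_eq_map, List.map_map]
  rfl

-- the string-level facts about aFmt (reused machinery)
theorem go_seg (x : List Char) (fuel : Nat) (l cur : List Char) (acc : List (List Char))
    (hx : '.' ∉ x) (hf : l.length + x.length < fuel) :
    PySem.Chars.splitOn.go ['.'] fuel (x ++ l) cur acc =
      PySem.Chars.splitOn.go ['.'] (fuel - x.length) l (x.reverse ++ cur) acc := by
  induction x generalizing fuel cur with
  | nil => simp
  | cons c x ih =>
    cases fuel with
    | zero => omega
    | succ f =>
      have hc : ('.' == c) = false := by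
        simp only [beq_eq_false_iff_ne, ne_eq]
        intro h; exact hx (by simp [← h])
      rw [List.cons_append, PySem.Chars.splitOn.go]
      simp only [List.isPrefixOf, hc, Bool.false_and, if_false]
      rw [ih f (c :: cur) (fun h => hx (List.mem_cons_of_mem _ h)) (by simp at hf ⊢; omega)]
      simp

theorem go_join (xs : List (List Char)) (x : List Char) (fuel : Nat) (cur : List Char)
    (acc : List (List Char)) (hx : '.' ∉ x) (hxs : ∀ y ∈ xs, '.' ∉ y)
    (hf : (PySem.Chars.join ['.'] (x :: xs)).length < fuel) :
    PySem.Chars.splitOn.go ['.'] fuel (PySem.Chars.join ['.'] (x :: xs)) cur acc =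
      acc.reverse ++ ((cur.reverse ++ x) :: xs) := by
  induction xs generalizing x fuel cur acc with
  | nil =>
    rw [PySem.Chars.join_singleton] at hf ⊢
    rw [show x = x ++ ([] : List Char) by simp, go_seg x fuel [] cur acc hx (by simpa using hf)]
    cases h : fuel - x.length with
    | zero => omega
    | succ f => rw [PySem.Chars.splitOn.go]; simp; omega
  | cons y ys ih =>
    have hj : PySem.Chars.join ['.'] (x :: y :: ys) =
        x ++ '.' :: PySem.Chars.join ['.'] (y :: ys) := by
      rw [PySem.Chars.join_cons_cons]; simp
    rw [hj] at hf ⊢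
    rw [go_seg x fuel _ cur acc hx (by simp at hf ⊢; omega)]
    cases h : fuel - x.length with
    | zero => simp at hf; omega
    | succ f =>
      rw [PySem.Chars.splitOn.go]
      simp only [List.isPrefixOf, beq_self_eq_true, Bool.true_and]
      have := ih y f [] ((x.reverse ++ cur).reverse :: acc) (hxs y (by simp))
        (fun z hz => hxs z (by simp [hz])) (by simp at hf ⊢; omega)
      simpa using this

theorem splitOn_join (xs : List (List Char)) (hne : xs ≠ [])
    (hxs : ∀ y ∈ xs, '.' ∉ y) :
    PySem.Chars.splitOn (PySem.Chars.join ['.'] xs) ['.'] = xs := by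
  cases xs with
  | nil => exact absurd rfl hne
  | cons x xs =>
    rw [PySem.Chars.splitOn,
      go_join xs x _ [] [] (hxs x (by simp)) (fun y hy => hxs y (by simp [hy])) (by omega)]
    simp

theorem digitChar_isDigit (k : Nat) (h : k < 10) : (Nat.digitChar k).isDigit = true := by
  interval_cases k <;> decide

theorem toDigitsCore_chars (fuel : Nat) : ∀ (n : Nat) (acc : List Char),
    (∀ c ∈ acc, c.isDigit = true) →
    ∀ c ∈ Nat.toDigitsCore 10 fuel n acc, c.isDigit = true := by
  induction fuel with
  | zero => intro n acc hacc c hc; rw [Nat.toDigitsCore] at hc; exact hacc c hc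
  | succ f ih =>
    intro n acc hacc c hc
    rw [Nat.toDigitsCore] at hc
    by_cases h : n / 10 = 0
    · simp only [h, if_true] at hc
      rcases List.mem_cons.mp hc with h' | h'
      · subst h'; exact digitChar_isDigit _ (Nat.mod_lt _ (by omega))
      · exact hacc c h'
    · simp only [h, if_false] at hc
      refine ih _ _ ?_ c hc
      intro d hd
      rcases List.mem_cons.mp hd with h' | h'
      · subst h'; exact digitChar_isDigit _ (Nat.mod_lt _ (by omega))
      · exact hacc d h'

theorem toChars_chars (n : Int) : ∀ c ∈ PySem.Int.toChars n, c = '-' ∨ c.isDigit = true := by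
  intro c hc
  rw [PySem.Int.toChars] at hc
  split at hc
  · rcases List.mem_cons.mp hc with h | h
    · exact Or.inl h
    · exact Or.inr (toDigitsCore_chars _ _ [] (by simp) c h)
  · exact Or.inr (toDigitsCore_chars _ _ [] (by simp) c hc)

theorem join_chars (xs : List (List Char)) (c : Char)
    (h : c ∈ PySem.Chars.join ['.'] xs) : c = '.' ∨ ∃ x ∈ xs, c ∈ x := by
  induction xs with
  | nil => simp [PySem.Chars.join, List.intercalate] at h
  | cons x xs ih =>
    cases xs with
    | nil =>
      rw [PySem.Chars.join_singleton] at h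
      exact Or.inr ⟨x, by simp, h⟩
    | cons y ys =>
      rw [show PySem.Chars.join ['.'] (x :: y :: ys) =
            x ++ '.' :: PySem.Chars.join ['.'] (y :: ys) by
          rw [PySem.Chars.join_cons_cons]; simp] at h
      rcases List.mem_append.mp h with h | h
      · exact Or.inr ⟨x, by simp, h⟩
      · rcases List.mem_cons.mp h with h | h
        · exact Or.inl h
        · rcases ih h with h | ⟨z, hz, hcz⟩
          · exact Or.inl h
          · exact Or.inr ⟨z, by simp [hz], hcz⟩

theorem fmt_toList (L : List Int) :
    (aFmt L).toList = PySem.Chars.join ['.'] (L.map PySem.Int.toChars) := by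
  rw [aFmt, PySem.Str.toList_join, List.map_map]
  have : String.toList ∘ PySem.Int.toStr = PySem.Int.toChars := by
    funext n; exact PySem.Int.toList_toStr n
  rw [this]
  rfl

theorem fmt_chars (L : List Int) (c : Char) (h : c ∈ (aFmt L).toList) :
    c = '.' ∨ c = '-' ∨ c.isDigit = true := by
  rw [fmt_toList] at h
  rcases join_chars _ c h with h | ⟨x, hx, hcx⟩
  · exact Or.inl h
  · rcases List.mem_map.mp hx with ⟨n, _, rfl⟩
    exact Or.inr (toChars_chars n c hcx)

theorem endswith_dev_false (L : List Int) :
    PySem.Str.endswith (aFmt L) "dev" = false := by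
  rw [PySem.Str.endswith_eq]
  cases h : PySem.Chars.endswith (aFmt L).toList ("dev".toList) with
  | false => rfl
  | true =>
    exfalso
    have hs := (PySem.Chars.endswith_iff _ _).mp h
    have hv : 'v' ∈ (aFmt L).toList := hs.subset (by decide)
    rcases fmt_chars L 'v' hv with h' | h' | h' <;> simp_all

theorem split_fmt (L : List Int) (h : L ≠ []) :
    (PySem.Str.split? (aFmt L) ".").getD [] =
      (L.map PySem.Int.toChars).map String.ofList := by
  have hb := PySem.Str.split?_map (aFmt L) "."
  have hc : PySem.Chars.split? (aFmt L).toList (".".toList) =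
      some (L.map PySem.Int.toChars) := by
    rw [show (".".toList) = ['.'] from rfl, PySem.Chars.split?]
    simp only [List.isEmpty_cons, if_false, Option.some.injEq]
    rw [fmt_toList, if_neg (by decide), Option.some_inj]
    refine splitOn_join _ (fun he => h (List.map_eq_nil_iff.mp he)) ?_
    intro y hy
    rcases List.mem_map.mp hy with ⟨n, _, rfl⟩
    intro hdot
    rcases toChars_chars n '.' hdot with h' | h' <;> simp_all
  rw [hc] at hb
  cases hs : PySem.Str.split? (aFmt L) "." with
  | none => rw [hs] at hb; simp at hb
  | some l =>
    rw [hs] at hb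
    simp only [Option.map_some, Option.some.injEq] at hb
    simp only [hs, Option.getD_some]
    have : (l.map String.toList).map String.ofList = (L.map PySem.Int.toChars).map String.ofList := by
      rw [hb]
    rw [← this, List.map_map]
    simp [Function.comp_def]

-- length bookkeeping
theorem length_aBump (p : List Int) (rel : String) : (aBump p rel).length = p.length := by
  rw [aBump]
  split_ifs <;> simp [PySem.List.length_pySetD]

theorem length_aVP (cv : String) :
    (aVP cv).length =
      ((PySem.Str.split? (if PySem.Str.endswith cv "dev" then
        PySem.Str.replace cv "dev" "" else cv) ".").getD []).length := by
  rw [aVP]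
  split_ifs with h <;> simp [h, aParts, PySem.List.length_pySetD]

-- the core list computations
theorem bList_tail (t : List String) (k : Option Int) (δ : Int) :
    ∀ s : Int, 3 ≤ s →
    (PySem.List.enumerate t s).map
      (fun ip => bRule k ip.1 ((PySem.Int.ofStr? ip.2).getD 0 + (if ip.1 == 2 then δ else 0))) =
      t.map (fun p => (PySem.Int.ofStr? p).getD 0) := by
  induction t with
  | nil => intro s _; simp [PySem.List.enumerate_nil]
  | cons x t ih =>
    intro s hs
    rw [PySem.List.enumerate_cons, List.map_cons, List.map_cons, ih (s + 1) (by omega)]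
    have h2 : (s == (2 : Int)) = false := by simp; omega
    have hle : ¬ (s ≤ (2 : Int)) := by omega
    cases k <;> simp [bRule, h2, hle]

theorem bList_cons3 (a b c : String) (t : List String) (k : Option Int) (δ : Int) :
    bList (a :: b :: c :: t) k δ =
      bRule k 0 ((PySem.Int.ofStr? a).getD 0) ::
      bRule k 1 ((PySem.Int.ofStr? b).getD 0) ::
      bRule k 2 ((PySem.Int.ofStr? c).getD 0 + δ) ::
      t.map (fun p => (PySem.Int.ofStr? p).getD 0) := by
  rw [bList, PySem.List.enumerate_cons, PySem.List.enumerate_cons, PySem.List.enumerate_cons]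
  simp only [List.map_cons]
  rw [show ((0:Int)+1+1+1) = 3 from by norm_num, bList_tail t k δ 3 (by omega)]
  norm_num

theorem bList_none_zero (ps : List String) :
    bList ps none 0 = ps.map (fun p => (PySem.Int.ofStr? p).getD 0) := by
  rw [bList]
  have : ∀ (l : List String) (s : Int),
      (PySem.List.enumerate l s).map
        (fun ip => bRule none ip.1 ((PySem.Int.ofStr? ip.2).getD 0 + (if ip.1 == 2 then (0:Int) else 0))) =
        l.map (fun p => (PySem.Int.ofStr? p).getD 0) := by
    intro l
    induction l with
    | nil => intro s; simp [PySem.List.enumerate_nil]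
    | cons x l ih =>
      intro s
      rw [PySem.List.enumerate_cons, List.map_cons, List.map_cons, ih (s + 1)]
      simp [bRule]
  exact this ps 0

-- evaluating the release table
theorem tget_minor : PySem.Dict.get? altTable "minor" = some 2 := by decide
theorem tget_normal : PySem.Dict.get? altTable "normal" = some 1 := by decide
theorem tget_major : PySem.Dict.get? altTable "major" = some 0 := by decide
theorem tget_none (rel : String) (h1 : rel ≠ "minor") (h2 : rel ≠ "normal") (h3 : rel ≠ "major") :
    PySem.Dict.get? altTable rel = none := by
  simp [altTable, PySem.Dict.get?]
  refine ⟨fun h => ?_, fun h => ?_, fun h => ?_⟩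
  · exact h3 h.symm
  · exact h2 h.symm
  · exact h1 h.symm

-- pySetD / pyGetD on a 3-element-headed list
theorem setD0 (x y z : Int) (r : List Int) (v : Int) :
    PySem.List.pySetD (x :: y :: z :: r) 0 v = v :: y :: z :: r := by
  simp [PySem.List.pySetD, PySem.List.pySet?, PySem.List.pyIdx?, PySem.List.clampIdx,
    show ((0:Int) ≤ (r.length:Int) + 1 + 1) by omega, show ((0:Int) ≤ (r.length:Int) + 1) by omega,
    show ((0:Int) ≤ (r.length:Int)) by omega]
theorem setD1 (x y z : Int) (r : List Int) (v : Int) :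
    PySem.List.pySetD (x :: y :: z :: r) 1 v = x :: v :: z :: r := by
  simp [PySem.List.pySetD, PySem.List.pySet?, PySem.List.pyIdx?, PySem.List.clampIdx,
    show ((0:Int) ≤ (r.length:Int) + 1 + 1) by omega, show ((0:Int) ≤ (r.length:Int) + 1) by omega,
    show ((0:Int) ≤ (r.length:Int)) by omega, show ((1:Int) ≤ (r.length:Int) + 1 + 1) by omega,
    show ((2:Int) ≤ (r.length:Int) + 1 + 1) by omega]
theorem setD2 (x y z : Int) (r : List Int) (v : Int) :
    PySem.List.pySetD (x :: y :: z :: r) 2 v = x :: y :: v :: r := by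
  simp [PySem.List.pySetD, PySem.List.pySet?, PySem.List.pyIdx?, PySem.List.clampIdx,
    show ((0:Int) ≤ (r.length:Int) + 1) by omega,
    show ((2:Int) ≤ (r.length:Int) + 1 + 1) by omega]
theorem getD1 (x y z : Int) (r : List Int) (d : Int) :
    PySem.List.pyGetD (x :: y :: z :: r) 1 d = y := by
  simp [PySem.List.pyGetD, PySem.List.pyGet?, PySem.List.pyIdx?,
    show ((0:Int) ≤ (r.length:Int) + 1) by omega]
theorem getD2 (x y z : Int) (r : List Int) (d : Int) :
    PySem.List.pyGetD (x :: y :: z :: r) 2 d = z := by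
  simp [PySem.List.pyGetD, PySem.List.pyGet?, PySem.List.pyIdx?,
    show ((2:Int) ≤ (r.length:Int) + 1 + 1) by omega]

theorem aBump_cons3 (x y z : Int) (r : List Int) (rel : String) :
    aBump (x :: y :: z :: r) rel =
      if rel = "minor" then x :: y :: (z + 1) :: r
      else if rel = "normal" then x :: (y + 1) :: 0 :: r
      else if rel = "major" then (x + 1) :: 0 :: 0 :: r
      else x :: y :: z :: r := by
  rw [aBump]
  by_cases h1 : rel = "minor"
  · simp [h1, getD2, setD2]
  · by_cases h2 : rel = "normal"
    · simp [h1, h2, getD1, setD1, setD2]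
    · by_cases h3 : rel = "major"
      · simp [h3, setD0, setD1, setD2]
      · simp [h1, h2, h3]

-- the heart: B's transformed list IS A's bumped list, on a 3-headed part list
theorem core_eq (a b c : String) (t : List String) (rel : String) (δ : Int) :
    bList (a :: b :: c :: t)
      (PySem.Dict.get? altTable rel) δ =
    aBump ((PySem.Int.ofStr? a).getD 0 :: (PySem.Int.ofStr? b).getD 0 ::
      ((PySem.Int.ofStr? c).getD 0 + δ) :: t.map (fun p => (PySem.Int.ofStr? p).getD 0)) rel := by
  rw [aBump_cons3, bList_cons3]
  by_cases h1 : rel = "minor"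
  · rw [h1, tget_minor]; simp [bRule]
  · by_cases h2 : rel = "normal"
    · rw [h2, tget_normal]; simp [bRule]
    · by_cases h3 : rel = "major"
      · rw [h3, tget_major]; simp [bRule]
      · rw [tget_none rel h1 h2 h3]; simp [bRule, h1, h2, h3]

-- A's version-part list in 3-headed form
theorem aVP_eq_dev (cv : String) (a b c : String) (t : List String)
    (h : PySem.Str.endswith cv "dev" = true)
    (he : ((PySem.Str.split? (PySem.Str.replace cv "dev" "") ".").getD []) = a :: b :: c :: t) :
    aVP cv = bList (a :: b :: c :: t) none (-1) := by
  rw [aVP, if_pos h, aParts, he, List.map_cons, List.map_cons, List.map_cons, getD2, setD2,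
    bList_cons3]
  simp [bRule, sub_eq_add_neg]

theorem aVP_eq_nodev (cv : String) (h : PySem.Str.endswith cv "dev" = false) :
    aVP cv = aParts cv := by
  rw [aVP, h]
  simp

theorem aBump_unnamed (rel : String) (h1 : rel ≠ "minor") (h2 : rel ≠ "normal")
    (h3 : rel ≠ "major") (L : List Int) : aBump L rel = L := by
  rw [aBump]
  simp [h1, h2, h3]

-- assembled release-string equality
theorem release_eq (cv rel : String)
    (hdev3 : PySem.Str.endswith cv "dev" = true →
      3 ≤ ((PySem.Str.split? (PySem.Str.replace cv "dev" "") ".").getD []).length)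
    (hrel3 : (rel = "minor" ∨ rel = "normal" ∨ rel = "major") →
      3 ≤ ((PySem.Str.split? (if PySem.Str.endswith cv "dev" then
        PySem.Str.replace cv "dev" "" else cv) ".").getD []).length) :
    altTransform (if PySem.Str.endswith cv "dev" then PySem.Str.replace cv "dev" "" else cv)
      (PySem.Dict.get? altTable rel)
      (if PySem.Str.endswith cv "dev" then -1 else 0) =
    aFmt (aBump (aVP cv) rel) := by
  rw [transform_eq]
  congr 1
  by_cases hk : rel = "minor" ∨ rel = "normal" ∨ rel = "major"
  · -- named release: the part list has length ≥ 3, destructure it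
    cases hd : PySem.Str.endswith cv "dev" with
    | true =>
      have h3 := hrel3 hk
      rw [hd] at h3
      simp only [if_true] at h3
      obtain ⟨a, b, c, t, he⟩ : ∃ a b c t,
          ((PySem.Str.split? (PySem.Str.replace cv "dev" "") ".").getD []) = a :: b :: c :: t := by
        match hps : ((PySem.Str.split? (PySem.Str.replace cv "dev" "") ".").getD []), h3 with
        | a :: b :: c :: t, _ => exact ⟨a, b, c, t, rfl⟩
      simp only [if_true]
      rw [he, core_eq, aVP_eq_dev cv a b c t hd he, bList_cons3]
      simp [bRule]
    | false =>
      have h3 := hrel3 hk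
      rw [hd] at h3
      simp only [Bool.false_eq_true, if_false] at h3
      obtain ⟨a, b, c, t, he⟩ : ∃ a b c t,
          ((PySem.Str.split? cv ".").getD []) = a :: b :: c :: t := by
        match hps : ((PySem.Str.split? cv ".").getD []), h3 with
        | a :: b :: c :: t, _ => exact ⟨a, b, c, t, rfl⟩
      simp only [Bool.false_eq_true, if_false]
      rw [he, core_eq, aVP_eq_nodev cv hd, aParts, he, List.map_cons, List.map_cons,
        List.map_cons]
      norm_num
  · -- unknown release type: both sides leave the part list alone
    rw [not_or, not_or] at hk
    obtain ⟨h1, h2, h3⟩ := hk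
    rw [tget_none rel h1 h2 h3, aBump_unnamed rel h1 h2 h3]
    cases hd : PySem.Str.endswith cv "dev" with
    | true =>
      simp only [if_true]
      have h3' := hdev3 hd
      obtain ⟨a, b, c, t, he⟩ : ∃ a b c t,
          ((PySem.Str.split? (PySem.Str.replace cv "dev" "") ".").getD []) = a :: b :: c :: t := by
        match hps : ((PySem.Str.split? (PySem.Str.replace cv "dev" "") ".").getD []), h3' with
        | a :: b :: c :: t, _ => exact ⟨a, b, c, t, rfl⟩
      rw [he, aVP_eq_dev cv a b c t hd he]
    | false =>
      simp only [Bool.false_eq_true, if_false]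
      rw [aVP_eq_nodev cv hd, bList_none_zero, aParts]

-- the dev-version strings agree: both sides re-split the release string R
theorem dev_eq (L : List Int) (hL : 3 ≤ L.length) :
    aFmt (aBump (aVP (aFmt L)) "minor") = altTransform (aFmt L) (some 2) 0 := by
  have hne : L ≠ [] := by intro h; rw [h] at hL; simp at hL
  have hvp : aVP (aFmt L) = aParts (aFmt L) := aVP_eq_nodev _ (endswith_dev_false L)
  have hlen : ((PySem.Str.split? (aFmt L) ".").getD []).length = L.length := by
    rw [split_fmt L hne]; simp
  obtain ⟨a, b, c, t, he⟩ : ∃ a b c t,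
      ((PySem.Str.split? (aFmt L) ".").getD []) = a :: b :: c :: t := by
    have h3 : 3 ≤ ((PySem.Str.split? (aFmt L) ".").getD []).length := by omega
    match hps : ((PySem.Str.split? (aFmt L) ".").getD []), h3 with
    | a :: b :: c :: t, _ => exact ⟨a, b, c, t, rfl⟩
  rw [transform_eq]
  congr 1
  have hc := core_eq a b c t "minor" 0
  rw [tget_minor] at hc
  rw [he, hc, hvp, aParts, he, List.map_cons, List.map_cons, List.map_cons]
  norm_num

set_option maxHeartbeats 1000000 in
theorem main (cv rel : String) (dev : Bool) (hpre : Pre_compute_semver cv rel dev) :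
    compute_semver cv rel dev = compute_semver_alt cv rel dev := by
  rw [Pre_compute_semver] at hpre
  obtain ⟨-, hdev3, hrel3, hcd3⟩ := hpre
  have hdev3' : PySem.Str.endswith cv "dev" = true →
      3 ≤ ((PySem.Str.split? (PySem.Str.replace cv "dev" "") ".").getD []).length := by
    intro h
    have := hdev3 h
    rw [h] at this
    simpa using this
  have hR := release_eq cv rel hdev3' hrel3
  rw [A_unfold, compute_semver_alt]
  cases hd : PySem.Str.endswith cv "dev" with
  | true =>
    rw [hd] at hR
    simp only [if_true] at hR ⊢
    rw [hR]
    cases dev with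
    | false => simp
    | true =>
      have hL : 3 ≤ (aBump (aVP cv) rel).length := by
        have h2 := hcd3 rfl
        rw [hd] at h2
        rw [length_aBump, length_aVP, hd]
        simp only [if_true] at h2 ⊢
        exact h2
      rw [A_unfold _ "minor" false]
      simp only [Bool.not_true, Bool.false_eq_true, if_false, if_true]
      rw [dev_eq (aBump (aVP cv) rel) hL]
  | false =>
    rw [hd] at hR
    simp only [Bool.false_eq_true, if_false] at hR ⊢
    rw [hR]
    cases dev with
    | false => simp
    | true =>
      have hL : 3 ≤ (aBump (aVP cv) rel).length := by
        have h2 := hcd3 rfl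
        rw [hd] at h2
        rw [length_aBump, length_aVP, hd]
        simp only [Bool.false_eq_true, if_false] at h2 ⊢
        exact h2
      rw [A_unfold _ "minor" false]
      simp only [Bool.not_true, Bool.false_eq_true, if_false, if_true]
      rw [dev_eq (aBump (aVP cv) rel) hL]

-- ===== VERDICT (by name: the statement is the Claim_ definition above) =====
theorem compute_semver_spec : Claim_equal_compute_semver := by
  intro cv rel dev _ hpre
  exact main cv rel dev hpre
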